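-- pv_equiv track=rewrite | github.com/MrBrantCode/unitest_baseline | mut_generate/mist_train_cf/cf_17821/solution.py | remove_punctuation_and_duplicates
-- ===== SOURCE A (Python) =====
-- def remove_punctuation_and_duplicates(s, punctuation):
--     """
--     Removes all occurrences of the punctuation mark and any adjacent duplicate characters in the string.
--
--     Args:
--         s (str): The input string.
--         punctuation (str): The punctuation mark to be removed.
--
--     Returns:
--         str: The modified string.
--     """
--     modified_string = []
--     for i, char in enumerate(s):
--         if char == punctuation:
--             continue
--         if i > 0 and char == s[i-1]:
--             continue
--         modified_string.append(char)
--     return ''.join(modified_string)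
-- ===== SOURCE B (Python) =====
-- def remove_punctuation_and_duplicates(s, punctuation):
--     """
--     Removes all occurrences of the punctuation mark and any adjacent duplicate characters in the string.
--
--     Two staged passes instead of one indexed loop: first collapse adjacent
--     duplicates by pairing each character with its predecessor (zip of s with
--     itself shifted) and keeping only the changing ones, then filter out the
--     punctuation character. Collapsing happens on the original string, so
--     duplicates separated by a removed punctuation are kept, as in A.
--     """
--     deduped = s[:1] + ''.join(b for a, b in zip(s, s[1:]) if a != b)
--     return ''.join(c for c in deduped if c != punctuation)
-- ===== Notes on version B (the rewrite author's own statement) =====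
-- stated objective: alternative
-- what changed: Replaced the single indexed loop (skip if char equals punctuation or the previous index) by two staged passes: collapse adjacent duplicates via a pairwise zip of s with its shift, then filter out the punctuation character.
import Mathlib
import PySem

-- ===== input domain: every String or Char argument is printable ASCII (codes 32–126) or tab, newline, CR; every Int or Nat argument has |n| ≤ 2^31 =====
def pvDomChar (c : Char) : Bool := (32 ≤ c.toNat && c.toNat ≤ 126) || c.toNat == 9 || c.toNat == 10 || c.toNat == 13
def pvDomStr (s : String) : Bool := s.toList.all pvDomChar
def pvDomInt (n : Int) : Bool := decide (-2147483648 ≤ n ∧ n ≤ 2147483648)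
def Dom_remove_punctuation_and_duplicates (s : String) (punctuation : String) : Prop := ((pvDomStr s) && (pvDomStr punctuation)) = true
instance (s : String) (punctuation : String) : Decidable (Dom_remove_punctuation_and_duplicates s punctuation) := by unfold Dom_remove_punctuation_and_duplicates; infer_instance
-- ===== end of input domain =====

-- B replaces A's single indexed loop by two staged passes: a pairwise-zip pass
-- collapsing adjacent duplicates of the original string, then a punctuation
-- filter; objective: alternative.

-- ===== PORT A =====
-- literal port of A: for i, char in enumerate(s): skip if char == punctuation,
-- skip if i > 0 and char == s[i-1], else append; then join.
def remove_punctuation_and_duplicates (s : String) (punctuation : String) : String :=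
  let chars := s.toList
  let modified_string :=
    (PySem.List.enumerate chars).foldl
      (fun acc ic =>
        if String.mk [ic.2] = punctuation then acc
        else if ic.1 > 0 ∧ PySem.List.pyGet? chars (ic.1 - 1) = some ic.2 then acc
        else acc ++ [ic.2])
      []
  String.mk modified_string

-- ===== PORT B =====
-- literal port of Source B:
--   deduped = s[:1] + ''.join(b for a, b in zip(s, s[1:]) if a != b)
--   return ''.join(c for c in deduped if c != punctuation)
def remove_punctuation_and_duplicates_alt (s : String) (punctuation : String) : String :=
  let cs := s.toList
  let deduped := cs.take 1 ++ ((cs.zip cs.tail).filter (fun ab => ab.1 ≠ ab.2)).map Prod.snd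
  String.mk (deduped.filter (fun c => String.mk [c] ≠ punctuation))

-- ===== PRECONDITION & SPEC =====
def Spec_remove_punctuation_and_duplicates (s : String) (punctuation : String) (out : String) : Prop := out = remove_punctuation_and_duplicates_alt s punctuation
instance (s : String) (punctuation : String) (out : String) : Decidable (Spec_remove_punctuation_and_duplicates s punctuation out) := by unfold Spec_remove_punctuation_and_duplicates; infer_instance

-- ===== CLAIM (what is proved, stated in full; the proofs are below) =====
def Claim_equal_remove_punctuation_and_duplicates : Prop := ∀ (s : String) (punctuation : String), Dom_remove_punctuation_and_duplicates s punctuation → Spec_remove_punctuation_and_duplicates s punctuation (remove_punctuation_and_duplicates s punctuation)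

-- ===== LEMMAS AND PROOFS =====

-- reference function: keep a char iff it is not the punctuation and differs from
-- the ORIGINAL previous character (carried as `prev`)
def pvDD (p : String) : Option Char → List Char → List Char
  | _, [] => []
  | prev, c :: rest =>
      (if String.mk [c] = p ∨ prev = some c then [] else [c]) ++ pvDD p (some c) rest

-- A's fold over `enumerate`, started at index pre.length within ys = pre ++ xs, is pvDD
theorem foldA_eq_pvDD (p : String) (ys : List Char) :
    ∀ (xs pre acc : List Char), ys = pre ++ xs →
    (PySem.List.enumerate xs ((pre.length : Int))).foldl
      (fun acc ic =>
        if String.mk [ic.2] = p then acc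
        else if ic.1 > 0 ∧ PySem.List.pyGet? ys (ic.1 - 1) = some ic.2 then acc
        else acc ++ [ic.2]) acc
    = acc ++ pvDD p pre.getLast? xs := by
  intro xs
  induction xs with
  | nil => intro pre acc _; simp [PySem.List.enumerate_nil, pvDD]
  | cons c rest ih =>
    intro pre acc hys
    rw [PySem.List.enumerate_cons, List.foldl_cons]
    have hstep :
        (if String.mk [c] = p then acc
         else if ((pre.length : Int)) > 0 ∧
             PySem.List.pyGet? ys ((pre.length : Int) - 1) = some c then acc
         else acc ++ [c])
        = acc ++ (if String.mk [c] = p ∨ pre.getLast? = some c then [] else [c]) := by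
      rcases pre.eq_nil_or_concat with h | ⟨q, b, h⟩
      · subst h
        simp only [List.length_nil, Nat.cast_zero, List.getLast?_nil, gt_iff_lt,
          lt_self_iff_false, false_and, if_false]
        by_cases hp : String.mk [c] = p <;> simp [hp]
      · have h' : pre = q ++ [b] := by simpa using h
        subst h'
        have hget : PySem.List.pyGet? ys (((q ++ [b]).length : Int) - 1) = some b := by
          have hcast : ((q ++ [b]).length : Int) - 1 = ((q.length : Nat) : Int) := by
            simp
          rw [hcast, hys]
          have he : (q ++ [b]) ++ c :: rest = q ++ b :: (c :: rest) := by simp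
          rw [he]
          exact PySem.List.pyGet?_append_length (pre := q) (y := b) (ys := c :: rest)
        have hlast : (q ++ [b]).getLast? = some b := by simp
        rw [hget, hlast]
        by_cases hp : String.mk [c] = p
        · simp [hp]
        · by_cases hbc : b = c <;> simp [hp, hbc]
    rw [hstep]
    have hrec := ih (pre ++ [c]) (acc ++ (if String.mk [c] = p ∨ pre.getLast? = some c then [] else [c])) (by simp [hys])
    have hidx : (pre.length : Int) + 1 = (((pre ++ [c]).length : Nat) : Int) := by
      simp
    rw [hidx, hrec]
    simp [pvDD]

-- B's zip-dedup-then-filter, started with predecessor `prev`, is pvDD (some prev)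
theorem zipDedup_filter_eq_pvDD (p : String) :
    ∀ (xs : List Char) (prev : Char),
      ((((prev :: xs).zip xs).filter (fun ab => ab.1 ≠ ab.2)).map Prod.snd).filter
          (fun c => String.mk [c] ≠ p)
        = pvDD p (some prev) xs := by
  intro xs
  induction xs with
  | nil => intro prev; simp [pvDD]
  | cons x t ih =>
    intro prev
    have hz : (prev :: x :: t).zip (x :: t) = (prev, x) :: ((x :: t).zip t) := by
      simp [List.zip]
    rw [hz, List.filter_cons]
    by_cases hpx : prev = x
    · subst hpx
      rw [if_neg (by simp)]
      rw [ih prev]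
      simp [pvDD]
    · rw [if_pos (by simp [hpx]), List.map_cons, List.filter_cons, ih x]
      by_cases hp : String.mk [x] = p
      · simp [pvDD, hp, hpx]
      · simp [pvDD, hp, hpx]

-- ===== VERDICT (by name: the statement is the Claim_ definition above) =====
theorem remove_punctuation_and_duplicates_spec : Claim_equal_remove_punctuation_and_duplicates := by
  intro s punctuation _
  unfold Spec_remove_punctuation_and_duplicates
  unfold remove_punctuation_and_duplicates remove_punctuation_and_duplicates_alt
  have hA := foldA_eq_pvDD punctuation s.toList s.toList [] [] (by simp)
  simp only [List.length_nil, Nat.cast_zero, List.getLast?_nil, List.nil_append] at hA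
  simp only []
  rw [hA]
  cases hcs : s.toList with
  | nil => simp [pvDD]
  | cons c rest =>
    have hB := zipDedup_filter_eq_pvDD punctuation rest c
    simp only [List.take, List.tail_cons, List.cons_append, List.nil_append,
      List.filter_cons]
    rw [show ((c :: rest).zip rest) = ((c :: rest).zip (c :: rest).tail) by rfl] at hB
    simp only [List.tail_cons] at hB
    rw [hB]
    by_cases hp : String.mk [c] = punctuation
    · simp [pvDD, hp]
    · simp [pvDD, hp]
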